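-- pv_equiv track=rewrite | github.com/manoskary/musym-GDL | musym/models/cad/data_loading/create_homo_graph_dataset.py | chord_to_intervalVector
-- ===== SOURCE A (Python) =====
-- from itertools import combinations
--
-- def chord_to_intervalVector(midi_pitches):
-- 	'''Given a chord it calculates the Interval Vector.
-- 	Parameters
-- 	----------
-- 	midi_pitches : list(int)
-- 		The midi_pitches, is a list of integers < 128.
-- 	Returns
-- 	-------
-- 	intervalVector : list(int)
-- 		The interval Vector is a list of six integer values.
-- 	'''
-- 	intervalVector = [0,0,0,0,0,0]
-- 	PC = set([mp%12 for mp in midi_pitches])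
-- 	for p1, p2 in combinations(PC, 2):
-- 		interval = int(abs(p1 - p2))
-- 		if interval <= 6 :
-- 			index = interval
-- 		else :
-- 			index = 12 - interval
-- 		if index != 0:
-- 			index = index-1
-- 			intervalVector[index] += 1
-- 	return intervalVector, list(PC)
-- ===== SOURCE B (Python) =====
-- def chord_to_intervalVector(midi_pitches):
--     '''Interval vector by interval-class membership probing instead of pair enumeration.'''
--     PC = set([mp % 12 for mp in midi_pitches])
--
--     def ic_count(k):
--         cnt = sum(1 for p in PC if (p + k) % 12 in PC)
--         # the tritone (k == 6) is seen from both endpoints of each pair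
--         return cnt // 2 if k == 6 else cnt
--
--     return [ic_count(k) for k in range(1, 7)], list(PC)
-- ===== Notes on version B (the rewrite author's own statement) =====
-- stated objective: alternative
-- what changed: Replaces the enumeration of all pitch-class pairs (itertools.combinations) with a per-interval-class membership probe: for each k in 1..6 it counts pitch classes p with (p+k)%12 in the set, halving the tritone count; no pair list is ever built.
import Mathlib
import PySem

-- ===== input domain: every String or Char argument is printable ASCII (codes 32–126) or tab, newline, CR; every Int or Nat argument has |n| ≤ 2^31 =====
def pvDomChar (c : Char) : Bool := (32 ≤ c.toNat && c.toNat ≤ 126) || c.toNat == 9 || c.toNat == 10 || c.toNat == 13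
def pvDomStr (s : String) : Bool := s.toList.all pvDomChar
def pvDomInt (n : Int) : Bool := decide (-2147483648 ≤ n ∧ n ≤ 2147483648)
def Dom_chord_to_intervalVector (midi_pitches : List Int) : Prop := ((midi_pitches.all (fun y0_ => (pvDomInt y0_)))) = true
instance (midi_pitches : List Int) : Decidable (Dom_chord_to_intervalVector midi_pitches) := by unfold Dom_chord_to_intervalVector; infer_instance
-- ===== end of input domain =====

-- B replaces the pitch-class-pair enumeration with a per-interval-class membership probe (alternative algorithm, same cost class).


-- ===== PORT A =====
-- Hand model of CPython's `list(set(xs))` for values 0 ≤ x < 12 (where hash(i) = i), which both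
-- Pythons compute (PySem.Set does not model set iteration order). Exact on this domain, validated
-- against CPython 3.11 (exhaustively for ≤ 5 values, and on 500k random inputs): distinct values are
-- open-address probed into the initial 8-slot table (probe step i ↦ (5*i+1) % 8; CPython's perturb
-- term is 0 for hashes < 32, and the linear-probe window does not apply to mask 7); inserting the 5th
-- distinct value resizes to a 32-slot table where every value 0..11 sits at its own slot, so from then
-- on iteration order is ascending. Inserting an already-present value is a no-op, so only the first
-- occurrences (PySem.Set.ofList) are inserted.
def pySetProbe12 (table : List (Option Int)) (h : Int) : Nat → Nat → List (Option Int)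
  | _, 0 => table  -- fuel 8 visits all 8 slots; never exhausted while an empty slot exists
  | i, fuel+1 =>
    match table.getD i none with
    | none => table.set i (some h)
    | some _ => pySetProbe12 table h ((5*i+1) % 8) fuel

def pySetList12 (xs : List Int) : List Int :=
  let d := PySem.Set.ofList xs
  if 5 ≤ d.length then PySem.List.sorted d (fun x => x) false
  else (d.foldl (fun t h => pySetProbe12 t h (PySem.Int.mod h 8).toNat 8) (List.replicate 8 none)).filterMap id


-- A's loop body ('for p1, p2 in combinations(PC, 2): ...'), named so the lemmas can speak about it
def ivStep (vec : List Int) (pr : List Int) : List Int :=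
  match pr with
  | [p1, p2] =>
    let interval := |p1 - p2|                      -- int(abs(p1 - p2))
    let index := if interval ≤ 6 then interval else 12 - interval
    if index ≠ 0 then
      PySem.List.pySetD vec (index - 1) (PySem.List.pyGetD vec (index - 1) 0 + 1)
    else vec
  | _ => vec                                        -- unreachable: combinations(_, 2) yields pairs

def chord_to_intervalVector (midi_pitches : List Int) : List Int × List Int :=
  let intervalVector : List Int := [0,0,0,0,0,0]
  let PC : List Int := pySetList12 (midi_pitches.map (fun mp => PySem.Int.mod mp 12))
  let iv := (PySem.List.combinations PC 2).foldl ivStep intervalVector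
  (iv, PC)

-- ===== PORT B =====
def ic_count (PC : List Int) (k : Int) : Int :=
  let cnt : Int := (PC.countP (fun p => decide (PySem.Int.mod (p + k) 12 ∈ PC)) : Nat)
  if k = 6 then PySem.Int.floordiv cnt 2 else cnt

def chord_to_intervalVector_alt (midi_pitches : List Int) : List Int × List Int :=
  let PC : List Int := pySetList12 (midi_pitches.map (fun mp => PySem.Int.mod mp 12))
  ((PySem.List.pyRange 1 7 1).map (ic_count PC), PC)

-- ===== PRECONDITION & SPEC =====
def Spec_chord_to_intervalVector (midi_pitches : List Int) (out : List Int × List Int) : Prop := out = chord_to_intervalVector_alt midi_pitches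
instance (midi_pitches : List Int) (out : List Int × List Int) : Decidable (Spec_chord_to_intervalVector midi_pitches out) := by unfold Spec_chord_to_intervalVector; infer_instance

-- ===== CLAIM (what is proved, stated in full; the proofs are below) =====
def Claim_equal_chord_to_intervalVector : Prop := ∀ (midi_pitches : List Int), Dom_chord_to_intervalVector midi_pitches → Spec_chord_to_intervalVector midi_pitches (chord_to_intervalVector midi_pitches)

-- ===== LEMMAS AND PROOFS =====

-- the interval class A buckets a pair (p, q) into
def icIndex (p q : Int) : Int := if |p - q| ≤ 6 then |p - q| else 12 - |p - q|

def classOf : List Int → Int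
  | [p, q] => icIndex p q
  | _ => 0

-- ----- facts about pySetList12: its members come from xs, and it has no duplicates -----

theorem pySetProbe12_cases (h : Int) : ∀ (fuel i : Nat) (t : List (Option Int)),
    pySetProbe12 t h i fuel = t ∨ ∃ j, t[j]? = some none ∧ pySetProbe12 t h i fuel = t.set j (some h) := by
  intro fuel
  induction fuel with
  | zero => intro i t; left; rfl
  | succ n ih =>
    intro i t
    unfold pySetProbe12
    rcases ht : t.getD i none with _ | v
    · by_cases hi : i < t.length
      · right
        refine ⟨i, ?_, rfl⟩
        rw [List.getElem?_eq_getElem hi, ← List.getD_eq_getElem t none hi, ht]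
      · left; exact List.set_eq_of_length_le (by omega)
    · exact ih _ t

theorem filterMap_set_some (t : List (Option Int)) (j : Nat) (x : Int) (hj : t[j]? = some none) :
    ∃ l r, t.filterMap id = l ++ r ∧ (t.set j (some x)).filterMap id = l ++ x :: r := by
  have hjl : j < t.length := by
    by_contra hc
    simp [List.getElem?_eq_none (show t.length ≤ j by omega)] at hj
  have hnone : t[j] = none := by
    rw [List.getElem?_eq_getElem hjl] at hj
    exact Option.some_inj.mp hj
  have ht : t = t.take j ++ t[j] :: t.drop (j+1) := by
    conv_lhs => rw [← List.take_append_drop j t, List.drop_eq_getElem_cons hjl]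
  refine ⟨(t.take j).filterMap id, (t.drop (j+1)).filterMap id, ?_, ?_⟩
  · conv_lhs => rw [ht]
    simp [List.filterMap_append, hnone]
  · rw [List.set_eq_take_cons_drop _ hjl]
    simp [List.filterMap_append]

theorem fold_probe_facts : ∀ (d : List Int) (t : List (Option Int)),
    d.Nodup → (t.filterMap id).Nodup → (∀ x ∈ t.filterMap id, x ∉ d) →
    (((d.foldl (fun t h => pySetProbe12 t h (PySem.Int.mod h 8).toNat 8) t).filterMap id).Nodup ∧
     ∀ x ∈ (d.foldl (fun t h => pySetProbe12 t h (PySem.Int.mod h 8).toNat 8) t).filterMap id,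
       x ∈ t.filterMap id ∨ x ∈ d) := by
  intro d
  induction d with
  | nil => exact fun t _ h1 _ => ⟨h1, fun x hx => Or.inl hx⟩
  | cons h d ih =>
    intro t hnd h1 h2
    have hhd : h ∉ d := (List.nodup_cons.mp hnd).1
    simp only [List.foldl_cons]
    rcases pySetProbe12_cases h 8 (PySem.Int.mod h 8).toNat t with heq | ⟨j, hj, heq⟩
    · rw [heq]
      obtain ⟨hn, hm⟩ := ih t (List.nodup_cons.mp hnd).2 h1
        (fun x hx hxd => h2 x hx (List.mem_cons_of_mem _ hxd))
      exact ⟨hn, fun x hx => (hm x hx).imp_right (List.mem_cons_of_mem _)⟩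
    · rw [heq]
      obtain ⟨l, r, e1, e2⟩ := filterMap_set_some t j h hj
      have hnotin : h ∉ t.filterMap id := fun hmem => h2 h hmem (List.mem_cons_self ..)
      have hnd' : ((t.set j (some h)).filterMap id).Nodup := by
        rw [e2, List.nodup_middle]
        exact List.nodup_cons.mpr ⟨by rw [← e1]; exact hnotin, by rwa [e1] at h1⟩
      have hmem' : ∀ x ∈ (t.set j (some h)).filterMap id, x ∈ t.filterMap id ∨ x = h := by
        intro x hx
        rw [e2] at hx
        rcases List.mem_append.mp hx with h' | h'
        · exact Or.inl (by rw [e1]; exact List.mem_append.mpr (Or.inl h'))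
        · rcases List.mem_cons.mp h' with h'' | h''
          · exact Or.inr h''
          · exact Or.inl (by rw [e1]; exact List.mem_append.mpr (Or.inr h''))
      obtain ⟨hn, hm⟩ := ih (t.set j (some h)) (List.nodup_cons.mp hnd).2 hnd'
        (fun x hx hxd => by
          rcases hmem' x hx with h' | rfl
          · exact h2 x h' (List.mem_cons_of_mem _ hxd)
          · exact hhd hxd)
      refine ⟨hn, fun x hx => ?_⟩
      rcases hm x hx with h' | h'
      · rcases hmem' x h' with h'' | rfl
        · exact Or.inl h''
        · exact Or.inr (List.mem_cons_self ..)
      · exact Or.inr (List.mem_cons_of_mem _ h')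

theorem pySetList12_nodup_mem (xs : List Int) :
    (pySetList12 xs).Nodup ∧ ∀ x ∈ pySetList12 xs, x ∈ xs := by
  unfold pySetList12
  by_cases hlen : 5 ≤ (PySem.Set.ofList xs).length
  · simp only [hlen, if_pos]
    constructor
    · exact ((PySem.List.sorted_perm _ _ _).nodup_iff).mpr (PySem.Set.nodup_ofList xs)
    · intro x hx
      rw [PySem.List.mem_sorted] at hx
      exact (PySem.Set.mem_ofList _ _).mp hx
  · simp only [hlen, if_false]
    have hrep : (List.replicate 8 (none : Option Int)).filterMap id = [] := rfl
    obtain ⟨hn, hm⟩ := fold_probe_facts (PySem.Set.ofList xs) (List.replicate 8 none)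
      (PySem.Set.nodup_ofList xs) (by rw [hrep]; exact List.nodup_nil)
      (by rw [hrep]; intro x hx; exact absurd hx (List.not_mem_nil))
    refine ⟨hn, fun x hx => ?_⟩
    rcases hm x hx with h' | h'
    · rw [hrep] at h'; exact absurd h' (List.not_mem_nil)
    · exact (PySem.Set.mem_ofList _ _).mp h'

-- ----- characterisation of A's fold over the pair list -----

set_option maxHeartbeats 2000000 in
theorem foldA_char : ∀ (prs : List (List Int)),
    (∀ pr ∈ prs, ∃ p q : Int, pr = [p, q] ∧ 0 ≤ p ∧ p < 12 ∧ 0 ≤ q ∧ q < 12 ∧ p ≠ q) →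
    ∀ (k₁ k₂ k₃ k₄ k₅ k₆ : Int),
    prs.foldl ivStep [k₁, k₂, k₃, k₄, k₅, k₆] =
      [k₁ + (prs.countP (fun pr => decide (classOf pr = 1)) : Nat),
       k₂ + (prs.countP (fun pr => decide (classOf pr = 2)) : Nat),
       k₃ + (prs.countP (fun pr => decide (classOf pr = 3)) : Nat),
       k₄ + (prs.countP (fun pr => decide (classOf pr = 4)) : Nat),
       k₅ + (prs.countP (fun pr => decide (classOf pr = 5)) : Nat),
       k₆ + (prs.countP (fun pr => decide (classOf pr = 6)) : Nat)] := by
  intro prs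
  induction prs with
  | nil => intro _ k₁ k₂ k₃ k₄ k₅ k₆; simp
  | cons pr prs ih =>
    intro h k₁ k₂ k₃ k₄ k₅ k₆
    obtain ⟨p, q, rfl, hp0, hp12, hq0, hq12, hpq⟩ := h _ (List.mem_cons_self ..)
    have hih := ih (fun x hx => h x (List.mem_cons_of_mem _ hx))
    have hD1 : 1 ≤ |p - q| := by
      have := abs_pos.mpr (sub_ne_zero.mpr hpq); omega
    have hD2 : |p - q| < 12 := abs_sub_lt_iff.mpr ⟨by omega, by omega⟩
    have hcl : classOf [p, q] = if |p - q| ≤ 6 then |p - q| else 12 - |p - q| := rfl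
    have hrange : 1 ≤ classOf [p, q] ∧ classOf [p, q] ≤ 6 := by
      rw [hcl]; split_ifs <;> omega
    have hstep : ∀ vec, ivStep vec [p, q] =
        PySem.List.pySetD vec (classOf [p, q] - 1) (PySem.List.pyGetD vec (classOf [p, q] - 1) 0 + 1) := by
      intro vec
      simp only [ivStep, ← hcl]
      rw [if_pos (by omega)]
    have h6 : classOf [p, q] = 1 ∨ classOf [p, q] = 2 ∨ classOf [p, q] = 3 ∨
        classOf [p, q] = 4 ∨ classOf [p, q] = 5 ∨ classOf [p, q] = 6 := by omega
    rcases h6 with hc | hc | hc | hc | hc | hc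
    · rw [List.foldl_cons, hstep, hc,
        show PySem.List.pySetD [k₁, k₂, k₃, k₄, k₅, k₆] (1-1) (PySem.List.pyGetD [k₁, k₂, k₃, k₄, k₅, k₆] (1-1) 0 + 1) = [k₁ + 1, k₂, k₃, k₄, k₅, k₆] from by norm_num; simp [pysem],
        hih]
      simp [hc]
      omega
    · rw [List.foldl_cons, hstep, hc,
        show PySem.List.pySetD [k₁, k₂, k₃, k₄, k₅, k₆] (2-1) (PySem.List.pyGetD [k₁, k₂, k₃, k₄, k₅, k₆] (2-1) 0 + 1) = [k₁, k₂ + 1, k₃, k₄, k₅, k₆] from by norm_num; simp [pysem],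
        hih]
      simp [hc]
      omega
    · rw [List.foldl_cons, hstep, hc,
        show PySem.List.pySetD [k₁, k₂, k₃, k₄, k₅, k₆] (3-1) (PySem.List.pyGetD [k₁, k₂, k₃, k₄, k₅, k₆] (3-1) 0 + 1) = [k₁, k₂, k₃ + 1, k₄, k₅, k₆] from by norm_num; simp [pysem],
        hih]
      simp [hc]
      omega
    · rw [List.foldl_cons, hstep, hc,
        show PySem.List.pySetD [k₁, k₂, k₃, k₄, k₅, k₆] (4-1) (PySem.List.pyGetD [k₁, k₂, k₃, k₄, k₅, k₆] (4-1) 0 + 1) = [k₁, k₂, k₃, k₄ + 1, k₅, k₆] from by norm_num; simp [pysem],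
        hih]
      simp [hc]
      omega
    · rw [List.foldl_cons, hstep, hc,
        show PySem.List.pySetD [k₁, k₂, k₃, k₄, k₅, k₆] (5-1) (PySem.List.pyGetD [k₁, k₂, k₃, k₄, k₅, k₆] (5-1) 0 + 1) = [k₁, k₂, k₃, k₄, k₅ + 1, k₆] from by norm_num; simp [pysem],
        hih]
      simp [hc]
      omega
    · rw [List.foldl_cons, hstep, hc,
        show PySem.List.pySetD [k₁, k₂, k₃, k₄, k₅, k₆] (6-1) (PySem.List.pyGetD [k₁, k₂, k₃, k₄, k₅, k₆] (6-1) 0 + 1) = [k₁, k₂, k₃, k₄, k₅, k₆ + 1] from by norm_num; simp [pysem],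
        hih]
      simp [hc]
      omega

-- ----- the counting heart -----

theorem countP_eq_indicator (xs : List Int) (v : Int) (hnd : xs.Nodup) :
    xs.countP (fun y => decide (y = v)) = if v ∈ xs then 1 else 0 := by
  induction xs with
  | nil => simp
  | cons x xs ih =>
    rw [List.countP_cons]
    obtain ⟨hx, hnd'⟩ := List.nodup_cons.mp hnd
    by_cases hxv : x = v
    · subst hxv
      rw [List.countP_eq_zero.mpr (fun a ha => by simp; rintro rfl; exact hx ha)]
      simp
    · rw [ih hnd']
      have hvx : (v = x) ↔ False := ⟨fun h => hxv h.symm, False.elim⟩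
      simp [hxv, List.mem_cons, hvx]

theorem countP_disjoint (xs : List Int) (a b : Int → Prop) [DecidablePred a] [DecidablePred b]
    (hdisj : ∀ x ∈ xs, ¬ (a x ∧ b x)) :
    xs.countP (fun x => decide (a x ∨ b x)) = xs.countP (fun x => decide (a x)) + xs.countP (fun x => decide (b x)) := by
  induction xs with
  | nil => simp
  | cons x xs ih =>
    simp only [List.countP_cons]
    rw [ih (fun y hy => hdisj y (List.mem_cons_of_mem _ hy))]
    have := hdisj x (List.mem_cons_self ..)
    by_cases ha : a x <;> by_cases hb : b x <;> simp [ha, hb] at this ⊢ <;> omega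

-- the bucket A puts the pair (x, y) into, as a membership condition on y
theorem icIndex_eq_iff (x y k : Int) (hx0 : 0 ≤ x) (hx12 : x < 12) (hy0 : 0 ≤ y) (hy12 : y < 12)
    (_hxy : x ≠ y) (hk1 : 1 ≤ k) (_hk6 : k ≤ 6) :
    icIndex x y = k ↔ (y = PySem.Int.mod (x + k) 12 ∨ y = PySem.Int.mod (x - k) 12) := by
  unfold icIndex
  rw [PySem.Int.mod_eq_emod_of_pos (by norm_num), PySem.Int.mod_eq_emod_of_pos (by norm_num)]
  rcases le_total x y with h | h
  · rw [abs_of_nonpos (by omega)]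
    split_ifs <;> omega
  · rw [abs_of_nonneg (by omega)]
    split_ifs <;> omega

theorem core_lt6 (k : Int) (hk1 : 1 ≤ k) (hk5 : k ≤ 5) : ∀ (l : List Int), l.Nodup →
    (∀ p ∈ l, 0 ≤ p ∧ p < 12) →
    (PySem.List.combinations l 2).countP (fun pr => decide (classOf pr = k)) =
      l.countP (fun p => decide (PySem.Int.mod (p + k) 12 ∈ l)) := by
  intro l
  induction l with
  | nil => intro _ _; simp [PySem.List.combinations]
  | cons x xs ih =>
    intro hnd hb
    obtain ⟨hnx, hnd'⟩ := List.nodup_cons.mp hnd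
    obtain ⟨hx0, hx12⟩ := hb x (List.mem_cons_self ..)
    have hb' : ∀ p ∈ xs, 0 ≤ p ∧ p < 12 := fun p hp => hb p (List.mem_cons_of_mem _ hp)
    have hIH := ih hnd' hb'
    -- left side: the pairs (x, y) for y ∈ xs, plus the pairs inside xs
    rw [PySem.List.combinations_cons_succ (r := 1), List.countP_append, List.countP_map,
        PySem.List.combinations_one, List.countP_map]
    simp only [Function.comp_def]
    have hL : xs.countP (fun y => decide (classOf [x, y] = k)) =
        (if PySem.Int.mod (x + k) 12 ∈ xs then 1 else 0) + (if PySem.Int.mod (x - k) 12 ∈ xs then 1 else 0) := by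
      have h1 : xs.countP (fun y => decide (classOf [x, y] = k)) =
          xs.countP (fun y => decide (y = PySem.Int.mod (x + k) 12 ∨ y = PySem.Int.mod (x - k) 12)) := by
        apply List.countP_congr
        intro y hy
        obtain ⟨hy0, hy12⟩ := hb' y hy
        have hxy : x ≠ y := fun hc => hnx (hc ▸ hy)
        simp only [classOf]
        simpa using icIndex_eq_iff x y k hx0 hx12 hy0 hy12 hxy hk1 (by omega)
      rw [h1, countP_disjoint xs _ _ (fun y hy => by
            rintro ⟨rfl, h2⟩
            rw [PySem.Int.mod_eq_emod_of_pos (by norm_num), PySem.Int.mod_eq_emod_of_pos (by norm_num)] at h2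
            omega),
          countP_eq_indicator xs _ hnd', countP_eq_indicator xs _ hnd']
    rw [hL]
    -- right side
    rw [List.countP_cons]
    have hhead : (decide (PySem.Int.mod (x + k) 12 ∈ x :: xs) : Bool) = decide (PySem.Int.mod (x + k) 12 ∈ xs) := by
      have hne : PySem.Int.mod (x + k) 12 ≠ x := by
        rw [PySem.Int.mod_eq_emod_of_pos (by norm_num)]; omega
      simp only [List.mem_cons, decide_eq_decide]
      exact ⟨fun h => h.resolve_left hne, Or.inr⟩
    have htail : xs.countP (fun p => decide (PySem.Int.mod (p + k) 12 ∈ x :: xs)) =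
        (if PySem.Int.mod (x - k) 12 ∈ xs then 1 else 0) +
          xs.countP (fun p => decide (PySem.Int.mod (p + k) 12 ∈ xs)) := by
      have h1 : xs.countP (fun p => decide (PySem.Int.mod (p + k) 12 ∈ x :: xs)) =
          xs.countP (fun p => decide (p = PySem.Int.mod (x - k) 12 ∨ PySem.Int.mod (p + k) 12 ∈ xs)) := by
        apply List.countP_congr
        intro p hp
        obtain ⟨hp0, hp12⟩ := hb' p hp
        simp only [List.mem_cons, decide_eq_true_eq]
        constructor
        · rintro (h1 | h1)
          · left
            rw [PySem.Int.mod_eq_emod_of_pos (by norm_num)] at h1 ⊢; omega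
          · right; exact h1
        · rintro (h1 | h1)
          · left
            rw [PySem.Int.mod_eq_emod_of_pos (by norm_num)] at h1 ⊢; omega
          · right; exact h1
      rw [h1, countP_disjoint xs _ _ (fun p hp => by
            rintro ⟨rfl, h2⟩
            exact hnx (by
              have : PySem.Int.mod (PySem.Int.mod (x - k) 12 + k) 12 = x := by
                rw [PySem.Int.mod_eq_emod_of_pos (by norm_num), PySem.Int.mod_eq_emod_of_pos (by norm_num)]
                omega
              rwa [this] at h2)),
          countP_eq_indicator xs _ hnd']
    rw [htail, hhead, hIH]
    simp only [decide_eq_true_eq]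
    split_ifs <;> omega

theorem core_6 : ∀ (l : List Int), l.Nodup →
    (∀ p ∈ l, 0 ≤ p ∧ p < 12) →
    2 * (PySem.List.combinations l 2).countP (fun pr => decide (classOf pr = 6)) =
      l.countP (fun p => decide (PySem.Int.mod (p + 6) 12 ∈ l)) := by
  intro l
  induction l with
  | nil => intro _ _; simp [PySem.List.combinations]
  | cons x xs ih =>
    intro hnd hb
    obtain ⟨hnx, hnd'⟩ := List.nodup_cons.mp hnd
    obtain ⟨hx0, hx12⟩ := hb x (List.mem_cons_self ..)
    have hb' : ∀ p ∈ xs, 0 ≤ p ∧ p < 12 := fun p hp => hb p (List.mem_cons_of_mem _ hp)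
    have hIH := ih hnd' hb'
    have hmm : PySem.Int.mod (x - 6) 12 = PySem.Int.mod (x + 6) 12 := by
      rw [PySem.Int.mod_eq_emod_of_pos (by norm_num), PySem.Int.mod_eq_emod_of_pos (by norm_num)]
      omega
    rw [PySem.List.combinations_cons_succ (r := 1), List.countP_append, List.countP_map,
        PySem.List.combinations_one, List.countP_map]
    simp only [Function.comp_def]
    have hL : xs.countP (fun y => decide (classOf [x, y] = 6)) =
        (if PySem.Int.mod (x + 6) 12 ∈ xs then 1 else 0) := by
      have h1 : xs.countP (fun y => decide (classOf [x, y] = 6)) =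
          xs.countP (fun y => decide (y = PySem.Int.mod (x + 6) 12)) := by
        apply List.countP_congr
        intro y hy
        obtain ⟨hy0, hy12⟩ := hb' y hy
        have hxy : x ≠ y := fun hc => hnx (hc ▸ hy)
        simp only [classOf, decide_eq_true_eq]
        rw [icIndex_eq_iff x y 6 hx0 hx12 hy0 hy12 hxy (by norm_num) (by norm_num), hmm]
        tauto
      rw [h1, countP_eq_indicator xs _ hnd']
    rw [hL]
    rw [List.countP_cons]
    have hhead : (decide (PySem.Int.mod (x + 6) 12 ∈ x :: xs) : Bool) = decide (PySem.Int.mod (x + 6) 12 ∈ xs) := by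
      have hne : PySem.Int.mod (x + 6) 12 ≠ x := by
        rw [PySem.Int.mod_eq_emod_of_pos (by norm_num)]; omega
      simp only [List.mem_cons, decide_eq_decide]
      exact ⟨fun h => h.resolve_left hne, Or.inr⟩
    have htail : xs.countP (fun p => decide (PySem.Int.mod (p + 6) 12 ∈ x :: xs)) =
        (if PySem.Int.mod (x + 6) 12 ∈ xs then 1 else 0) +
          xs.countP (fun p => decide (PySem.Int.mod (p + 6) 12 ∈ xs)) := by
      have h1 : xs.countP (fun p => decide (PySem.Int.mod (p + 6) 12 ∈ x :: xs)) =
          xs.countP (fun p => decide (p = PySem.Int.mod (x + 6) 12 ∨ PySem.Int.mod (p + 6) 12 ∈ xs)) := by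
        apply List.countP_congr
        intro p hp
        obtain ⟨hp0, hp12⟩ := hb' p hp
        simp only [List.mem_cons, decide_eq_true_eq]
        constructor
        · rintro (h1 | h1)
          · left
            rw [PySem.Int.mod_eq_emod_of_pos (by norm_num)] at h1 ⊢; omega
          · right; exact h1
        · rintro (h1 | h1)
          · left
            rw [PySem.Int.mod_eq_emod_of_pos (by norm_num)] at h1 ⊢; omega
          · right; exact h1
      rw [h1, countP_disjoint xs _ _ (fun p hp => by
            rintro ⟨rfl, h2⟩
            exact hnx (by
              have : PySem.Int.mod (PySem.Int.mod (x + 6) 12 + 6) 12 = x := by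
                rw [PySem.Int.mod_eq_emod_of_pos (by norm_num), PySem.Int.mod_eq_emod_of_pos (by norm_num)]
                omega
              rwa [this] at h2)),
          countP_eq_indicator xs _ hnd']
    rw [htail, hhead, ← hIH]
    simp only [decide_eq_true_eq, show (1 : Nat) + 1 = 2 from rfl]
    split_ifs <;> omega

-- the two interval vectors agree on any duplicate-free list of pitch classes
theorem iv_eq (PC : List Int) (hnd : PC.Nodup) (hb : ∀ p ∈ PC, 0 ≤ p ∧ p < 12) :
    (PySem.List.combinations PC 2).foldl ivStep [0, 0, 0, 0, 0, 0] =
      (PySem.List.pyRange 1 7 1).map (ic_count PC) := by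
  have hpairs : ∀ pr ∈ PySem.List.combinations PC 2,
      ∃ p q : Int, pr = [p, q] ∧ 0 ≤ p ∧ p < 12 ∧ 0 ≤ q ∧ q < 12 ∧ p ≠ q := by
    intro pr hpr
    obtain ⟨hsub, hlen⟩ := (PySem.List.mem_combinations_iff _ _ _).mp hpr
    match pr, hlen with
    | [p, q], _ =>
      have hpm : p ∈ PC := hsub.subset (by simp)
      have hqm : q ∈ PC := hsub.subset (by simp)
      have hndpr : ([p, q] : List Int).Nodup := hsub.nodup hnd
      refine ⟨p, q, rfl, (hb p hpm).1, (hb p hpm).2, (hb q hqm).1, (hb q hqm).2, ?_⟩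
      simpa using (List.nodup_cons.mp hndpr).1
  rw [foldA_char _ hpairs 0 0 0 0 0 0,
      show PySem.List.pyRange 1 7 1 = [1, 2, 3, 4, 5, 6] from by decide]
  simp only [List.map_cons, List.map_nil, List.cons.injEq, and_true]
  have e6 := core_6 PC hnd hb
  refine ⟨?_, ?_, ?_, ?_, ?_, ?_⟩
  · rw [core_lt6 1 (by norm_num) (by norm_num) PC hnd hb]; simp [ic_count]
  · rw [core_lt6 2 (by norm_num) (by norm_num) PC hnd hb]; simp [ic_count]
  · rw [core_lt6 3 (by norm_num) (by norm_num) PC hnd hb]; simp [ic_count]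
  · rw [core_lt6 4 (by norm_num) (by norm_num) PC hnd hb]; simp [ic_count]
  · rw [core_lt6 5 (by norm_num) (by norm_num) PC hnd hb]; simp [ic_count]
  · simp only [ic_count, if_pos]
    rw [← e6, PySem.Int.floordiv_eq_ediv_of_pos (by norm_num)]
    push_cast
    omega

-- ===== VERDICT (by name: the statement is the Claim_ definition above) =====
theorem chord_to_intervalVector_spec : Claim_equal_chord_to_intervalVector := by
  intro mp _
  unfold Spec_chord_to_intervalVector
  simp only [chord_to_intervalVector, chord_to_intervalVector_alt]
  obtain ⟨hnd, hmem⟩ := pySetList12_nodup_mem (mp.map (fun m => PySem.Int.mod m 12))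
  have hb : ∀ p ∈ pySetList12 (mp.map (fun m => PySem.Int.mod m 12)), 0 ≤ p ∧ p < 12 := by
    intro p hp
    obtain ⟨m, _, rfl⟩ := List.mem_map.mp (hmem p hp)
    rw [PySem.Int.mod_eq_emod_of_pos (by norm_num)]
    exact ⟨Int.emod_nonneg _ (by norm_num), Int.emod_lt_of_pos _ (by norm_num)⟩
  rw [iv_eq _ hnd hb]
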